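-- pv_equiv track=rewrite | github.com/Redvarik/pythonProject2 | Информатикс/112303.py | right_rotate_subarray
-- ===== SOURCE A (Python) =====
-- def right_rotate_subarray(arr, n, k, m, r):
--     k -= 1
--     m -= 1
--     sub_len = m - k + 1
--     r %= sub_len
--
--     for _ in range(r):
--         last_element = arr[m]
--         for i in range(m, k, -1):
--             arr[i] = arr[i - 1]
--         arr[k] = last_element
--     return arr
-- ===== SOURCE B (Python) =====
-- def right_rotate_subarray(arr, n, k, m, r):
--     # In-place right rotation of arr[k-1..m-1] by r via three reversals (return value and mutation match A)
--     k -= 1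
--     m -= 1
--     sub_len = m - k + 1
--     r %= sub_len
--
--     def rev(i, j):
--         while i < j:
--             arr[i], arr[j] = arr[j], arr[i]
--             i += 1
--             j -= 1
--
--     rev(k, m)
--     rev(k, k + r - 1)
--     rev(k + r, m)
--     return arr
-- ===== Notes on version B (the rewrite author's own statement) =====
-- stated objective: alternative
-- what changed: Replaces the r nested shift-by-one passes over the subarray with a single in-place three-reversal rotation (reverse the whole subarray, then reverse its first r and last sub_len-r parts).
-- outside the precondition, e.g. on right_rotate_subarray([], 0, 2, 3, 2): A returns [], B raises IndexError; on right_rotate_subarray([1, 2, 3], 3, -1, 0, 1): A returns [1, 3, 2], B returns [1, 3, 2]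
import Mathlib
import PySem

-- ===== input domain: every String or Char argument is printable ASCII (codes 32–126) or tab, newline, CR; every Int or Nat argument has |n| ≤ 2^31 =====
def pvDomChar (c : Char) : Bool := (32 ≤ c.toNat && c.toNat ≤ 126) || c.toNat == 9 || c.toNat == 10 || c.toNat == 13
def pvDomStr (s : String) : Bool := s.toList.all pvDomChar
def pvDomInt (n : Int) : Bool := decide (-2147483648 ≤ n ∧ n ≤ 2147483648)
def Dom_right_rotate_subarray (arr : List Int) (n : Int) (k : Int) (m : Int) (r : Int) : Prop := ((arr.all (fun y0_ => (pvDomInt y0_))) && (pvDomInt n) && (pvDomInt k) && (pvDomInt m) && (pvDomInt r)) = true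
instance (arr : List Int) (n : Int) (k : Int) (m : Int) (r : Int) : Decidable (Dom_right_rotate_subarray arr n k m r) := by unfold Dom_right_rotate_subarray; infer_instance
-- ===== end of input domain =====

-- ===== PORT A =====
-- B replaces A's r shift-by-one passes over the subarray with one three-reversal rotation
-- (both Pythons mutate arr in place and return it; the claim is about the returned list).
def right_rotate_subarray (arr : List Int) (n : Int) (k : Int) (m : Int) (r : Int) : List Int :=
  let k := k - 1
  let m := m - 1
  let sub_len := m - k + 1
  let r := PySem.Int.mod r sub_len
  (PySem.List.pyRange 0 r 1).foldl
    (fun a _ =>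
      let last_element := PySem.List.pyGetD a m 0
      let a := (PySem.List.pyRange m k (-1)).foldl
        (fun b i => PySem.List.pySetD b i (PySem.List.pyGetD b (i - 1) 0)) a
      PySem.List.pySetD a k last_element) arr

-- ===== PORT B =====
-- helper: Source B's rev(i, j), the two-pointer in-place reversal of arr[i..j]
def pvRev (a : List Int) (i : Int) (j : Int) : List Int :=
  if i < j then
    pvRev
      (PySem.List.pySetD (PySem.List.pySetD a i (PySem.List.pyGetD a j 0)) j
        (PySem.List.pyGetD a i 0))
      (i + 1) (j - 1)
  else a
termination_by (j - i).toNat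
decreasing_by omega

def right_rotate_subarray_alt (arr : List Int) (n : Int) (k : Int) (m : Int) (r : Int) : List Int :=
  let k := k - 1
  let m := m - 1
  let sub_len := m - k + 1
  let r := PySem.Int.mod r sub_len
  let a := pvRev arr k m
  let a := pvRev a k (k + r - 1)
  pvRev a (k + r) m

-- ===== PRECONDITION & SPEC =====
-- Pre_ admits the natural 1-based subarray domain 1 <= k <= m <= len(arr) plus the no-op regions
-- m <= k-2 and m = k (where the effective rotation count is 0 and neither program touches arr);
-- it excludes inputs where A raises ZeroDivisionError (m = k-1) or IndexError, where A returns
-- only because r % sub_len == 0 despite out-of-range bounds (there B's reversals raise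
-- IndexError), and the negative-index wraparound corner.
def Pre_right_rotate_subarray (arr : List Int) (n : Int) (k : Int) (m : Int) (r : Int) : Prop :=
  m ≤ k - 2 ∨ m = k ∨ (1 ≤ k ∧ k ≤ m ∧ m ≤ (arr.length : Int))
instance (arr : List Int) (n : Int) (k : Int) (m : Int) (r : Int) : Decidable (Pre_right_rotate_subarray arr n k m r) := by unfold Pre_right_rotate_subarray; infer_instance
def pvWitness_right_rotate_subarray : List Int × Int × Int × Int × Int := ([5, 1, 4, 2, 3], 5, 2, 4, 3)
def Spec_right_rotate_subarray (arr : List Int) (n : Int) (k : Int) (m : Int) (r : Int) (out : List Int) : Prop := out = right_rotate_subarray_alt arr n k m r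
instance (arr : List Int) (n : Int) (k : Int) (m : Int) (r : Int) (out : List Int) : Decidable (Spec_right_rotate_subarray arr n k m r out) := by unfold Spec_right_rotate_subarray; infer_instance

-- ===== CLAIM (what is proved, stated in full; the proofs are below) =====
def Claim_equal_right_rotate_subarray : Prop := ∀ (arr : List Int) (n : Int) (k : Int) (m : Int) (r : Int), Dom_right_rotate_subarray arr n k m r → Pre_right_rotate_subarray arr n k m r → Spec_right_rotate_subarray arr n k m r (right_rotate_subarray arr n k m r)

-- ===== LEMMAS AND PROOFS =====

lemma foldl_const_iterate (f : List Int → List Int) (l : List Int) (a : List Int) :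
    l.foldl (fun a _ => f a) a = f^[l.length] a := by
  induction l generalizing a with
  | nil => rfl
  | cons x xs ih => simp [List.foldl_cons, ih, Function.iterate_succ_apply]

lemma length_pyRange_zero (r : Int) : (PySem.List.pyRange 0 r 1).length = r.toNat := by
  simp [PySem.List.pyRange]
  omega

lemma pyRange_neg_one_nil (m k : Int) (h : ¬ k < m) : PySem.List.pyRange m k (-1) = [] := by
  simp [PySem.List.pyRange]
  omega

lemma pyRange_neg_one_cons (m k : Int) (h : k < m) :
    PySem.List.pyRange m k (-1) = m :: PySem.List.pyRange (m - 1) k (-1) := by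
  simp only [PySem.List.pyRange]
  norm_num
  have h1 : (m - k).toNat = (m - 1 - k).toNat + 1 := by omega
  split
  · split
    · rw [h1, List.range_succ_eq_map]
      simp only [List.map_cons, List.map_map, Nat.cast_zero]
      rw [show m + -(0:Int) = m by ring]
      congr 1
      apply List.map_congr_left
      intro x hx
      simp only [Function.comp_apply]
      push_cast
      ring
    · have h2 : (m - k).toNat = 1 := by omega
      rw [h2]
      simp [List.range_succ]
  · omega

lemma innerA_aux (K d : Nat) (a : List Int) (hM : K + d < a.length) :
    (PySem.List.pyRange ((K : Int) + (d : Int)) (K : Int) (-1)).foldl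
      (fun b i => PySem.List.pySetD b i (PySem.List.pyGetD b (i - 1) 0)) a
    = a.take (K + 1) ++ (a.drop K).take d ++ a.drop (K + d + 1) := by
  induction d generalizing a with
  | zero =>
    rw [pyRange_neg_one_nil _ _ (by omega)]
    simp [List.take_append_drop]
  | succ d ih =>
    rw [pyRange_neg_one_cons _ _ (by push_cast; omega)]
    simp only [List.foldl_cons]
    have e1 : (K : Int) + ((d : Nat) + 1 : Nat) = ((K + d + 1 : Nat) : Int) := by push_cast; ring
    have e2 : (K : Int) + ((d : Nat) + 1 : Nat) - 1 = ((K + d : Nat) : Int) := by push_cast; ring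
    push_cast
    rw [show (K : Int) + ((d : Int) + 1) = ((K + d + 1 : Nat) : Int) by push_cast; ring,
        show ((K + d + 1 : Nat) : Int) - 1 = ((K + d : Nat) : Int) by push_cast; ring]
    rw [PySem.List.pySetD_natCast, PySem.List.pyGetD_natCast]
    rw [show ((K + d : Nat) : Int) = (K : Int) + (d : Int) by push_cast; ring]
    rw [ih _ (by simpa using by omega)]
    have hga : a.getD (K + d) 0 = a[K + d]'(by omega) := List.getD_eq_getElem a 0 (by omega)
    rw [hga]
    rw [List.take_set_of_le (by omega)]
    rw [List.drop_set, if_neg (by omega), List.take_set_of_le (by omega)]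
    rw [List.drop_set, if_neg (by omega)]
    rw [show K + d + 1 - (K + d + 1) = 0 by omega]
    rw [List.drop_eq_getElem_cons (l := a) (i := K + d + 1) (by omega), List.set_cons_zero]
    rw [show (List.drop K a).take (d+1) = (List.drop K a).take d ++ [a[K + d]'(by omega)] from ?_]
    · simp [List.append_assoc]
      rfl
    · rw [List.take_add_one, List.getElem?_drop]
      rw [List.getElem?_eq_getElem (by omega)]
      rfl

lemma innerA (a : List Int) (K M : Nat) (hKM : K ≤ M) (hM : M < a.length) :
    (PySem.List.pyRange (M : Int) (K : Int) (-1)).foldl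
      (fun b i => PySem.List.pySetD b i (PySem.List.pyGetD b (i - 1) 0)) a
    = a.take (K + 1) ++ (a.drop K).take (M - K) ++ a.drop (M + 1) := by
  have e : (M : Int) = (K : Int) + ((M - K : Nat) : Int) := by push_cast; omega
  rw [e, innerA_aux K (M - K) a (by omega)]
  rw [show K + (M - K) + 1 = M + 1 by omega]

-- A's outer-loop body as a function of 0-based Nat bounds K ≤ M
def stepAfun (K M : Nat) (a : List Int) : List Int :=
  let last_element := PySem.List.pyGetD a (M : Int) 0
  let a := (PySem.List.pyRange (M : Int) (K : Int) (-1)).foldl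
    (fun b i => PySem.List.pySetD b i (PySem.List.pyGetD b (i - 1) 0)) a
  PySem.List.pySetD a (K : Int) last_element

lemma stepA_spec (a : List Int) (K M : Nat) (hKM : K ≤ M) (hM : M < a.length) :
    stepAfun K M a
    = a.take K ++ ((a[M]'hM) :: (a.drop K).take (M - K)) ++ a.drop (M + 1) := by
  unfold stepAfun
  rw [innerA a K M hKM hM]
  rw [PySem.List.pyGetD_natCast, PySem.List.pySetD_natCast]
  rw [List.getD_eq_getElem a 0 hM]
  have htake : a.take (K + 1) = a.take K ++ [a[K]'(by omega)] := by
    rw [List.take_add_one, List.getElem?_eq_getElem (by omega)]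
    rfl
  rw [htake]
  have hset : ((a.take K ++ [a[K]'(by omega)]) ++ (a.drop K).take (M - K) ++ a.drop (M + 1)).set K (a[M]'hM)
      = (a.take K ++ [a[M]'hM]) ++ (a.drop K).take (M - K) ++ a.drop (M + 1) := by
    rw [List.set_append, if_pos (by simp; omega)]
    rw [List.set_append, if_pos (by simp; omega)]
    rw [List.set_append, if_neg (by simp)]
    rw [show K - (a.take K).length = 0 by simp; omega]
    rfl
  rw [List.append_assoc, List.append_assoc] at hset ⊢
  rw [hset]
  simp [List.append_assoc]

lemma iterA (K L : Nat) (hL : 1 ≤ L) (P S Q : List Int) (hP : P.length = K)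
    (hS : S.length = L) (t : Nat) (ht : t ≤ L) :
    (stepAfun K (K + L - 1))^[t] (P ++ S ++ Q)
    = P ++ (S.drop (L - t) ++ S.take (L - t)) ++ Q := by
  subst hP hS
  induction t with
  | zero =>
    simp [List.drop_length, List.take_length]
  | succ t ih =>
    rw [Function.iterate_succ_apply', ih (by omega)]
    set j : Nat := S.length - t with hj
    have hj1 : 1 ≤ j := by omega
    set X : List Int := S.drop j ++ S.take j with hX
    have hXlen : X.length = S.length := by simp [hX]; omega
    have hlen : P.length + S.length - 1 < (P ++ X ++ Q).length := by
      simp [hXlen]; omega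
    rw [stepA_spec (P ++ X ++ Q) P.length (P.length + S.length - 1) (by omega) hlen]
    have c1 : (P ++ X ++ Q).take P.length = P := by
      rw [List.append_assoc, List.take_left]
    have c2 : (P ++ X ++ Q).drop P.length = X ++ Q := by
      rw [List.append_assoc, List.drop_left]
    have c4 : (P ++ X ++ Q).drop (P.length + S.length - 1 + 1) = Q := by
      rw [show P.length + S.length - 1 + 1 = (P ++ X).length + 0 by simp [hXlen]; omega]
      rw [List.drop_length_add_append]
      rfl
    have cgetX : ∀ h, X[S.length - 1]'h = S[j-1]'(by omega) := by
      intro h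
      show (S.drop j ++ S.take j)[S.length - 1]'(by simpa [hX] using h) = _
      rw [List.getElem_append_right (by simp; omega)]
      have hidx : S.length - 1 - (S.drop j).length = j - 1 := by simp; omega
      simp only [hidx]
      rw [List.getElem_take]
    have c3 : ∀ h, (P ++ X ++ Q)[P.length + S.length - 1]'h = S[j-1]'(by omega) := by
      intro h
      rw [List.getElem_append_left (by simp [hXlen]; omega)]
      rw [List.getElem_append_right (by omega) (h₂ := by simp [hXlen]; omega)]
      have hidx : P.length + S.length - 1 - P.length = S.length - 1 := by omega
      simp only [hidx]
      exact cgetX _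
    have c6 : (X ++ Q).take (P.length + S.length - 1 - P.length) = S.drop j ++ S.take (j - 1) := by
      have hidx : P.length + S.length - 1 - P.length = S.length - 1 := by omega
      rw [hidx, List.take_append]
      rw [show S.length - 1 - X.length = 0 by omega]
      rw [List.take_zero, List.append_nil]
      show (S.drop j ++ S.take j).take (S.length - 1) = _
      rw [List.take_append]
      rw [List.take_of_length_le (by simp; omega)]
      rw [List.take_take]
      congr 2
      simp
      omega
    rw [c1, c3, c4, c2, c6]
    have hdrop : S.drop (S.length - (t+1)) = S[j-1]'(by omega) :: S.drop j := by
      rw [show S.length - (t+1) = j - 1 by omega]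
      rw [List.drop_eq_getElem_cons (by omega)]
      congr 2
      omega
    rw [show S.length - (t+1) = j - 1 by omega] at *
    rw [hdrop]
    simp [List.append_assoc]

lemma pvRev_spec (a : List Int) (i j : Nat) (hij : i ≤ j + 1) (hj : j < a.length) :
    pvRev a (i : Int) (j : Int)
    = a.take i ++ ((a.drop i).take (j + 1 - i)).reverse ++ a.drop (j + 1) := by
  induction hd : j + 1 - i using Nat.strong_induction_on generalizing i j a with
  | _ d ih =>
  subst hd
  by_cases hlt : i < j
  · rw [pvRev, if_pos (by exact_mod_cast hlt)]
    rw [PySem.List.pyGetD_natCast, PySem.List.pyGetD_natCast, PySem.List.pySetD_natCast]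
    rw [show (j : Int) = ((j : Nat) : Int) from rfl, PySem.List.pySetD_natCast]
    rw [List.getD_eq_getElem a 0 hj, List.getD_eq_getElem a 0 (by omega)]
    rw [show (i : Int) + 1 = ((i + 1 : Nat) : Int) by push_cast; ring,
        show (j : Int) - 1 = ((j - 1 : Nat) : Int) by push_cast; omega]
    set a2 : List Int := (a.set i (a[j]'hj)).set j (a[i]'(by omega)) with ha2
    have ha2len : a2.length = a.length := by rw [ha2]; simp
    rw [ih (j - 1 - i) (by omega) a2 (i+1) (j-1) (by omega) (by rw [ha2len]; omega) (by omega)]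
    have c1 : a2.take (i+1) = a.take i ++ [a[j]'hj] := by
      rw [ha2, List.take_set_of_le (by omega), List.take_set]
      rw [List.take_add_one, List.getElem?_eq_getElem (by omega)]
      simp only [Option.toList_some]
      rw [List.set_append, if_neg (by simp)]
      rw [show i - (a.take i).length = 0 by simp; omega]
      rfl
    have c2 : (a2.drop (i+1)).take (j-1-i) = (a.drop (i+1)).take (j-1-i) := by
      rw [ha2, List.drop_set, if_neg (by omega), List.drop_set, if_pos (by omega)]
      rw [List.take_set_of_le (by omega)]
    have c3 : a2.drop (j-1+1) = (a[i]'(by omega)) :: a.drop (j+1) := by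
      rw [show j - 1 + 1 = j by omega]
      rw [ha2, List.drop_set, if_neg (by omega), List.drop_set, if_pos hlt]
      rw [show j - j = 0 by omega]
      rw [List.drop_eq_getElem_cons (by omega), List.set_cons_zero]
    have c5 : (a.drop i).take (j + 1 - i)
        = (a[i]'(by omega)) :: ((a.drop (i+1)).take (j-1-i) ++ [a[j]'hj]) := by
      rw [List.drop_eq_getElem_cons (i := i) (by omega)]
      rw [show j + 1 - i = (j - i) + 1 by omega]
      rw [List.take_succ_cons]
      congr 1
      rw [show j - i = (j - 1 - i) + 1 by omega]
      rw [List.take_add_one, List.getElem?_drop, show i + 1 + (j - 1 - i) = j by omega,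
          List.getElem?_eq_getElem hj]
      simp only [Option.toList_some]
    rw [c1, c2, c3, c5]
    rw [show (i+1) = i + 1 from rfl]
    simp [List.append_assoc]
  · rw [pvRev, if_neg (by exact_mod_cast hlt)]
    by_cases heq : i = j + 1
    · subst heq
      simp
    · have hij' : i = j := by omega
      subst hij'
      rw [show i + 1 - i = 1 by omega]
      rw [List.take_one, List.head?_drop, List.getElem?_eq_getElem (by omega)]
      simp

-- ===== VERDICT (by name: the statement is the Claim_ definition above) =====
theorem right_rotate_subarray_spec : Claim_equal_right_rotate_subarray := by
  intro arr n k m r hdom hpre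
  unfold Spec_right_rotate_subarray
  rcases hpre with hc | hc | ⟨h1, h2, h3⟩
  · -- m ≤ k - 2 : sub_len < 0, r % sub_len ≤ 0, both programs are no-ops
    have hb := PySem.Int.mod_neg_bounds r (b := m - 1 - (k - 1) + 1) (by omega)
    have hnil : PySem.List.pyRange 0 (PySem.Int.mod r (m - 1 - (k - 1) + 1)) 1 = [] := by
      rw [← List.length_eq_zero_iff, length_pyRange_zero]
      omega
    simp only [right_rotate_subarray, right_rotate_subarray_alt]
    rw [hnil]
    rw [pvRev, if_neg (by omega)]
    rw [pvRev, if_neg (by omega)]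
    rw [pvRev, if_neg (by omega)]
    rfl
  · -- m = k : sub_len = 1, r % 1 = 0, both programs are no-ops
    have hb1 := PySem.Int.mod_nonneg r (b := m - 1 - (k - 1) + 1) (by omega)
    have hb2 := PySem.Int.mod_lt r (b := m - 1 - (k - 1) + 1) (by omega)
    have hnil : PySem.List.pyRange 0 (PySem.Int.mod r (m - 1 - (k - 1) + 1)) 1 = [] := by
      rw [← List.length_eq_zero_iff, length_pyRange_zero]
      omega
    simp only [right_rotate_subarray, right_rotate_subarray_alt]
    rw [hnil]
    rw [pvRev, if_neg (by omega)]
    rw [pvRev, if_neg (by omega)]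
    rw [pvRev, if_neg (by omega)]
    rfl

  have hk1 : k - 1 = ((k - 1).toNat : Int) := by omega
  have hm1 : m - 1 = ((m - 1).toNat : Int) := by omega
  set K : Nat := (k - 1).toNat with hK
  set M : Nat := (m - 1).toNat with hM
  set L : Nat := M - K + 1 with hL
  have hKM : K ≤ M := by omega
  have hMlen : M < arr.length := by omega
  have hLpos : (0:Int) < (L:Int) := by push_cast; omega
  have hsub : m - 1 - (k - 1) + 1 = (L : Int) := by push_cast; omega
  set r' : Int := PySem.Int.mod r (L : Int) with hr'
  have hr0 : 0 ≤ r' := PySem.Int.mod_nonneg r hLpos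
  have hrL : r' < (L : Int) := PySem.Int.mod_lt r hLpos
  set t : Nat := r'.toNat with ht
  have hrt : r' = (t : Int) := by omega
  have htL : t < L := by omega
  -- decomposition
  set P : List Int := arr.take K with hP
  set S : List Int := (arr.drop K).take L with hS
  set Q : List Int := arr.drop (M + 1) with hQ
  have hPlen : P.length = K := by simp [hP]; omega
  have hSlen : S.length = L := by simp [hS]; omega
  have harr : arr = P ++ S ++ Q := by
    rw [hP, hS, hQ, List.append_assoc]
    conv_lhs => rw [← List.take_append_drop K arr]
    congr 1
    conv_lhs => rw [← List.take_append_drop L (arr.drop K)]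
    congr 1
    rw [List.drop_drop]
    congr 1
    omega
  -- A side
  have hA : right_rotate_subarray arr n k m r
      = P ++ (S.drop (L - t) ++ S.take (L - t)) ++ Q := by
    simp only [right_rotate_subarray]
    rw [hk1, hm1]
    have hsub2 : (M : Int) - (K : Int) + 1 = (L : Int) := by push_cast; omega
    rw [hsub2, ← hr']
    show (PySem.List.pyRange 0 r' 1).foldl (fun a _ => stepAfun K M a) arr = _
    rw [foldl_const_iterate, length_pyRange_zero, ← ht]
    rw [show M = K + L - 1 by omega]
    rw [harr]
    exact iterA K L (by omega) P S Q hPlen hSlen t (by omega)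
  have harrlen : arr.length = K + L + Q.length := by
    conv_lhs => rw [harr]
    simp [hPlen, hSlen]
    omega
  have hB : right_rotate_subarray_alt arr n k m r
      = P ++ (S.drop (L - t) ++ S.take (L - t)) ++ Q := by
    simp only [right_rotate_subarray_alt]
    rw [hk1, hm1]
    have hsub2 : (M : Int) - (K : Int) + 1 = (L : Int) := by push_cast; omega
    rw [hsub2, ← hr']
    rw [pvRev_spec arr K M (by omega) hMlen]
    rw [show M + 1 - K = L by omega]
    rw [← hP, ← hS, ← hQ]
    set b1 : List Int := P ++ S.reverse ++ Q with hb1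
    have hb1P : b1.take K = P := by
      rw [hb1, List.append_assoc, ← hPlen, List.take_left]
    have hb1SQ : b1.drop K = S.reverse ++ Q := by
      rw [hb1, List.append_assoc, ← hPlen, List.drop_left]
    have hb1len : b1.length = arr.length := by
      rw [hb1, harrlen]
      simp [hPlen, hSlen]
      omega
    by_cases ht0 : t = 0
    · rw [hrt, ht0]
      simp only [Nat.cast_zero]
      have hstep2 : pvRev b1 (K : Int) ((K : Int) + 0 - 1) = b1 := by
        rw [pvRev, if_neg (by omega)]
      rw [hstep2]
      rw [show (K : Int) + 0 = (K : Int) by ring]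
      rw [pvRev_spec b1 K M (by omega) (by rw [hb1len]; omega)]
      rw [hb1P, hb1SQ]
      have e1 : (S.reverse ++ Q).take (M + 1 - K) = S.reverse := by
        rw [show M + 1 - K = L by omega]
        rw [List.take_append_of_le_length (by simp [hSlen])]
        rw [List.take_of_length_le (by simp [hSlen])]
      have e2 : b1.drop (M + 1) = Q := by
        rw [hb1, show M + 1 = (P ++ S.reverse).length + 0 by simp [hPlen, hSlen]; omega,
            List.drop_length_add_append, List.drop_zero]
      rw [e1, e2, List.reverse_reverse]
      rw [show S.drop (L - 0) = [] from by rw [List.drop_eq_nil_iff]; omega]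
      rw [show S.take (L - 0) = S from by rw [List.take_of_length_le (by omega)]]
      simp
    · rw [hrt]
      rw [show (K : Int) + (t : Int) - 1 = ((K + t - 1 : Nat) : Int) by push_cast; omega]
      rw [pvRev_spec b1 K (K + t - 1) (by omega) (by rw [hb1len]; omega)]
      rw [show K + t - 1 + 1 = K + t by omega, show K + t - K = t by omega]
      rw [hb1P, hb1SQ]
      have e1 : (S.reverse ++ Q).take t = S.reverse.take t :=
        List.take_append_of_le_length (by simp [hSlen]; omega)
      have e2 : b1.drop (K + t) = S.reverse.drop t ++ Q := by
        rw [← List.drop_drop, hb1SQ, List.drop_append,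
            show t - S.reverse.length = 0 by simp [hSlen]; omega, List.drop_zero]
      rw [e1, e2]
      set U : List Int := (S.reverse.take t).reverse with hU
      set V : List Int := S.reverse.drop t with hV
      have hUlen : U.length = t := by simp [hU, hSlen]; omega
      have hVlen : V.length = L - t := by simp [hV, hSlen]
      set b2 : List Int := P ++ U ++ (V ++ Q) with hb2
      have hb2' : b2 = (P ++ U) ++ (V ++ Q) := by rw [hb2, List.append_assoc]
      have hb2len : b2.length = arr.length := by
        rw [hb2, harrlen]
        simp [hPlen, hUlen, hVlen]
        omega
      rw [show (K : Int) + (t : Int) = ((K + t : Nat) : Int) by push_cast; ring]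
      rw [pvRev_spec b2 (K + t) M (by omega) (by rw [hb2len]; omega)]
      have c1 : b2.take (K + t) = P ++ U := by
        rw [hb2', show K + t = (P ++ U).length by simp [hPlen, hUlen], List.take_left]
      have c2 : b2.drop (K + t) = V ++ Q := by
        rw [hb2', show K + t = (P ++ U).length by simp [hPlen, hUlen], List.drop_left]
      have c3 : (V ++ Q).take (M + 1 - (K + t)) = V := by
        rw [show M + 1 - (K + t) = L - t by omega]
        rw [List.take_append_of_le_length (by omega)]
        rw [List.take_of_length_le (by omega)]
      have c4 : b2.drop (M + 1) = Q := by
        rw [show b2 = ((P ++ U) ++ V) ++ Q by rw [hb2]; simp [List.append_assoc],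
            show M + 1 = ((P ++ U) ++ V).length + 0 by simp [hPlen, hUlen, hVlen]; omega,
            List.drop_length_add_append, List.drop_zero]
      rw [c1, c2, c3, c4]
      have hUS : U = S.drop (L - t) := by
        rw [hU, List.reverse_take]
        simp [hSlen]
      have hVS : V.reverse = S.take (L - t) := by
        rw [hV, List.reverse_drop]
        simp [hSlen]
      rw [hUS, hVS]
      simp [List.append_assoc]
  rw [hA, hB]
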